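-- pv_equiv track=rewrite | github.com/sreejabodakuntla/CRT | IV-SEM/Python/Assignments/M02_Logic_Building_and_Patterns/AST05/task.py | number_triangle
-- ===== SOURCE A (Python) =====
-- def number_triangle(n: int) -> str:
--     result = []
--
--     for i in range(1, n + 1):
--         row = ""
--         for j in range(1, i + 1):
--             row += str(j)
--         result.append(row)
--
--     return "\n".join(result)
-- ===== SOURCE B (Python) =====
-- def number_triangle(n: int) -> str:
--     result = []
--     row = ""
--     for i in range(1, n + 1):
--         row += str(i)
--         result.append(row)
--     return "\n".join(result)
-- ===== Notes on version B (the rewrite author's own statement) =====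
-- stated objective: faster
-- what changed: B keeps one running row string and extends it with str(i) each iteration, reusing the previous row instead of recomputing every row with a nested inner loop.
import Mathlib
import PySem

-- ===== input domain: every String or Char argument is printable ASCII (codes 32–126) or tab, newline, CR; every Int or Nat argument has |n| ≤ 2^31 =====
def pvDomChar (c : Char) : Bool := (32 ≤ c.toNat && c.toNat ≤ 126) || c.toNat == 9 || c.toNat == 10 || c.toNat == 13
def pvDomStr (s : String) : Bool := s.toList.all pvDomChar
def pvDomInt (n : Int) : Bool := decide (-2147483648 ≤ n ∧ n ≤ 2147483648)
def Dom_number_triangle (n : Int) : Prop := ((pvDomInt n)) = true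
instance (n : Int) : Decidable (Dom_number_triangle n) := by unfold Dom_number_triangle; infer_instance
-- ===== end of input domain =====

-- B rebuilds each row incrementally from the previous one in a single pass (simpler); A recomputes every row with a nested loop. Equivalence is proved for the return value.

-- ===== PORT A =====
-- inner loop of A: row = ""; for j in range(1, i+1): row += str(j)
def aRow (i : Int) : String :=
  (PySem.List.pyRange 1 (i + 1) 1).foldl (fun row j => row ++ PySem.Int.toStr j) ""

def number_triangle (n : Int) : String :=
  PySem.Str.join "\n"
    ((PySem.List.pyRange 1 (n + 1) 1).foldl (fun res i => res ++ [aRow i]) [])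

-- ===== PORT B =====
-- single pass carrying (row, result)
def bStep (st : String × List String) (i : Int) : String × List String :=
  let row := st.1 ++ PySem.Int.toStr i
  (row, st.2 ++ [row])

def number_triangle_alt (n : Int) : String :=
  PySem.Str.join "\n" (((PySem.List.pyRange 1 (n + 1) 1).foldl bStep ("", [])).2)

-- ===== PRECONDITION & SPEC =====
def Spec_number_triangle (n : Int) (out : String) : Prop := out = number_triangle_alt n
instance (n : Int) (out : String) : Decidable (Spec_number_triangle n out) := by unfold Spec_number_triangle; infer_instance

-- ===== CLAIM (what is proved, stated in full; the proofs are below) =====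
def Claim_equal_number_triangle : Prop := ∀ (n : Int), Dom_number_triangle n → Spec_number_triangle n (number_triangle n)

-- ===== LEMMAS AND PROOFS =====

theorem aRow_succ (k : Nat) :
    aRow ((k : Int) + 1) = aRow k ++ PySem.Int.toStr ((k : Int) + 1) := by
  unfold aRow
  rw [PySem.List.pyRange_one_succ_right (by omega : (1:Int) ≤ (k : Int) + 1)]
  simp [List.foldl_append]

theorem state_eq (k : Nat) :
    (PySem.List.pyRange 1 ((k : Int) + 1) 1).foldl bStep ("", []) =
      (aRow k, (PySem.List.pyRange 1 ((k : Int) + 1) 1).foldl (fun res i => res ++ [aRow i]) []) := by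
  induction k with
  | zero =>
      rw [PySem.List.pyRange_one_eq_nil (by omega)]
      unfold aRow
      rw [PySem.List.pyRange_one_eq_nil (by omega)]
      rfl
  | succ m ih =>
      have h : ((m + 1 : Nat) : Int) + 1 = ((m : Int) + 1) + 1 := by push_cast; ring
      rw [h, PySem.List.pyRange_one_succ_right (by omega : (1:Int) ≤ (m : Int) + 1)]
      rw [List.foldl_append, List.foldl_append, ih]
      simp [bStep, ← aRow_succ]

theorem number_triangle_spec : Claim_equal_number_triangle := by
  intro n _
  unfold Spec_number_triangle number_triangle number_triangle_alt
  by_cases h : n ≤ 0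
  · rw [PySem.List.pyRange_one_eq_nil (by omega)]; rfl
  · obtain ⟨k, rfl⟩ : ∃ k : Nat, n = (k : Int) := ⟨n.toNat, (Int.toNat_of_nonneg (by omega)).symm⟩
    rw [state_eq k]
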